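-- pv_equiv track=rewrite | github.com/yangyang0126/PythonLearning | Python每日一练/每日一练_201905/每日一练0527.py | split_bucket
-- ===== SOURCE A (Python) =====
-- def split_bucket(array, n):
--     buckets = [[] for _ in range(n)]
--     for i ,num in enumerate(array):
--         if (i // n) % 2 == 0:
--             bucket = buckets[i % n]
--         else:
--             bucket = buckets[-(i % n) - 1]
--         bucket.append(num)
--     return buckets
-- ===== SOURCE B (Python) =====
-- def split_bucket(array, n):
--     buckets = [[] for _ in range(n)]
--     if n > 0:
--         nrows = (len(array) + n - 1) // n
--         rows = [array[k * n:(k + 1) * n] for k in range(nrows)]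
--         for r, row in enumerate(rows):
--             for p, num in enumerate(row):
--                 if r % 2 == 0:
--                     buckets[p].append(num)
--                 else:
--                     buckets[n - 1 - p].append(num)
--     return buckets
-- ===== Notes on version B (the rewrite author's own statement) =====
-- stated objective: alternative
-- what changed: Replaces the single flat pass with floordiv/mod index arithmetic per element by first chunking the array into rows of length n and then traversing rows and positions, appending to buckets[p] on even rows and buckets[n-1-p] on odd rows.
import Mathlib
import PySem

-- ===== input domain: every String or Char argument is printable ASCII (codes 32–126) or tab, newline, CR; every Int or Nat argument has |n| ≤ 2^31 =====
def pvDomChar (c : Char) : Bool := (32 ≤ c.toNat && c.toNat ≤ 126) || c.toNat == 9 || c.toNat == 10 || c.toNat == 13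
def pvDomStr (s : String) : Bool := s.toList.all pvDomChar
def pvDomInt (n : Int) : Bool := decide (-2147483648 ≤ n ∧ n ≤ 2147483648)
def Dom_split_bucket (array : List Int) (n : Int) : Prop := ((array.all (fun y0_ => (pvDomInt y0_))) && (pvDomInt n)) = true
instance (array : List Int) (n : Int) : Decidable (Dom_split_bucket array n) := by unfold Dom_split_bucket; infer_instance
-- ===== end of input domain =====

-- B chunks the input into rows of length n and walks rows/positions instead of A's flat
-- pass with floordiv/mod index arithmetic (objective: alternative decomposition, same cost).

-- ===== PORT A =====
-- Python list indexing buckets[j] (negative j counts from the end); the 'else buckets'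
-- branch is Python's IndexError, unreachable inside Pre_.
def split_bucket (array : List Int) (n : Int) : List (List Int) :=
  let buckets : List (List Int) := (PySem.List.pyRange 0 n 1).map (fun _ => [])
  (PySem.List.enumerate array 0).foldl (fun buckets inum =>
    let i := inum.1
    let num := inum.2
    let j : Int :=
      if PySem.Int.mod (PySem.Int.floordiv i n) 2 == 0 then PySem.Int.mod i n
      else -(PySem.Int.mod i n) - 1
    let k : Int := if j < 0 then j + (buckets.length : Int) else j
    if 0 ≤ k ∧ k < (buckets.length : Int) then
      buckets.set k.toNat (buckets.getD k.toNat [] ++ [num])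
    else buckets) buckets

-- ===== PORT B =====
-- indices p and n-1-p are always in range when n > 0, realised by set/getD
def split_bucket_alt (array : List Int) (n : Int) : List (List Int) :=
  let buckets : List (List Int) := (PySem.List.pyRange 0 n 1).map (fun _ => [])
  if n > 0 then
    let nrows := PySem.Int.floordiv ((array.length : Int) + n - 1) n
    let rows := (PySem.List.pyRange 0 nrows 1).map
      (fun k => PySem.List.slice array (some (k * n)) (some ((k + 1) * n)))
    (PySem.List.enumerate rows 0).foldl (fun buckets rrow =>
      let r := rrow.1
      (PySem.List.enumerate rrow.2 0).foldl (fun buckets pnum =>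
        let p := pnum.1
        let num := pnum.2
        let j : Int := if PySem.Int.mod r 2 == 0 then p else n - 1 - p
        buckets.set j.toNat (buckets.getD j.toNat [] ++ [num])) buckets) buckets
  else buckets

-- ===== PRECONDITION & SPEC =====
-- Pre_ excludes exactly the inputs where Python A raises: a nonempty array with n ≤ 0
-- (ZeroDivisionError for n = 0, IndexError for n < 0).
def Pre_split_bucket (array : List Int) (n : Int) : Prop := array = [] ∨ 1 ≤ n
instance (array : List Int) (n : Int) : Decidable (Pre_split_bucket array n) := by unfold Pre_split_bucket; infer_instance
def pvWitness_split_bucket : List Int × Int := ([1, 2, 3, 4, 5], 2)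

def Spec_split_bucket (array : List Int) (n : Int) (out : List (List Int)) : Prop := out = split_bucket_alt array n
instance (array : List Int) (n : Int) (out : List (List Int)) : Decidable (Spec_split_bucket array n out) := by unfold Spec_split_bucket; infer_instance

-- ===== CLAIM (what is proved, stated in full; the proofs are below) =====
def Claim_equal_split_bucket : Prop := ∀ (array : List Int) (n : Int), Dom_split_bucket array n → Pre_split_bucket array n → Spec_split_bucket array n (split_bucket array n)

-- ===== LEMMAS AND PROOFS =====

-- common intermediate: the abstract boustrophedon step / fold on Nat indices
def gstep (N : Nat) (bs : List (List Int)) (i : Nat) (x : Int) : List (List Int) :=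
  let j := if (i / N) % 2 = 0 then i % N else N - 1 - i % N
  bs.set j (bs.getD j [] ++ [x])

def gfold (N : Nat) (bs : List (List Int)) (l : List Int) (s : Nat) : List (List Int) :=
  match l with
  | [] => bs
  | x :: xs => gfold N (gstep N bs s x) xs (s + 1)

theorem gstep_length (N : Nat) (bs : List (List Int)) (i : Nat) (x : Int) :
    (gstep N bs i x).length = bs.length := by
  simp [gstep]

theorem gfold_length (N : Nat) (l : List Int) : ∀ (bs : List (List Int)) (s : Nat),
    (gfold N bs l s).length = bs.length := by
  induction l with
  | nil => intro bs s; rfl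
  | cons x xs ih => intro bs s; simp [gfold, ih, gstep_length]

theorem gfold_append (N : Nat) (a : List Int) : ∀ (b : List Int) (bs : List (List Int)) (s : Nat),
    gfold N bs (a ++ b) s = gfold N (gfold N bs a s) b (s + a.length) := by
  induction a with
  | nil => intro b bs s; simp [gfold]
  | cons x xs ih => intro b bs s; simp [gfold, ih]; ring_nf

-- A's step equals the abstract step (for a nonnegative running index, n = N > 0)
theorem Astep_eq (N : Nat) (hN : 0 < N) (bs : List (List Int)) (hlen : bs.length = N)
    (s : Nat) (x : Int) :
    (let i := ((s : Nat) : Int); let num := x;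
     let j : Int := if PySem.Int.mod (PySem.Int.floordiv i (N : Int)) 2 == 0
        then PySem.Int.mod i (N : Int) else -(PySem.Int.mod i (N : Int)) - 1;
     let k : Int := if j < 0 then j + (bs.length : Int) else j;
     if 0 ≤ k ∧ k < (bs.length : Int) then bs.set k.toNat (bs.getD k.toNat [] ++ [num]) else bs)
    = gstep N bs s x := by
  have hNps : (0 : Int) < (N : Int) := by exact_mod_cast hN
  have hmodlt : s % N < N := Nat.mod_lt _ hN
  simp only [PySem.Int.floordiv_eq_ediv_of_pos hNps, PySem.Int.mod_eq_emod_of_pos hNps,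
    PySem.Int.mod_eq_emod_of_pos (by norm_num : (0:Int) < 2)]
  have hdiv : ((s : Int) / (N : Int)) = ((s / N : Nat) : Int) := (Int.natCast_div s N).symm
  have hmod : ((s : Int) % (N : Int)) = ((s % N : Nat) : Int) := (Int.natCast_mod s N).symm
  simp only [hdiv, hmod]
  by_cases h : (s / N) % 2 = 0
  · have hc : ((((s / N : Nat) : Int)) % 2 == 0) = true := by
      rw [beq_iff_eq]; exact_mod_cast h
    simp only [hc, if_true, gstep, h, hlen]
    have hjn : ¬ (((s % N : Nat) : Int) < 0) := by omega
    simp only [hjn, if_false]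
    have hguard : (0 : Int) ≤ ((s % N : Nat) : Int) ∧ ((s % N : Nat) : Int) < (N : Int) := by
      constructor
      · omega
      · exact_mod_cast hmodlt
    rw [if_pos hguard]
    simp only [Int.toNat_natCast, List.getD]
  · have hc : ((((s / N : Nat) : Int)) % 2 == 0) = false := by
      rw [beq_eq_false_iff_ne]; intro hh; exact h (by exact_mod_cast hh)
    simp only [hc, Bool.false_eq_true, if_false, gstep, h, hlen]
    have hnn : (0 : Int) ≤ ((s % N : Nat) : Int) := by omega
    have hjn : (-(((s % N : Nat) : Int)) - 1 < 0) := by omega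
    rw [if_pos hjn]
    have hcast : ((s % N : Nat) : Int) = ((s % N : Int)) := rfl
    have hk : -(((s % N : Nat) : Int)) - 1 + (N : Int) = ((N - 1 - s % N : Nat) : Int) := by
      have h1 : ((N - 1 - s % N : Nat) : Int) = (N : Int) - 1 - ((s % N : Nat) : Int) := by
        have : ((s % N : Nat) : Int) < (N : Int) := by exact_mod_cast hmodlt
        push_cast [Nat.cast_sub (by omega : s % N ≤ N - 1)]
        omega
      omega
    rw [hk]
    have hguard : (0 : Int) ≤ ((N - 1 - s % N : Nat) : Int) ∧ ((N - 1 - s % N : Nat) : Int) < (N : Int) := by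
      constructor
      · omega
      · exact_mod_cast (by omega : N - 1 - s % N < N)
    rw [if_pos hguard]
    simp

-- A's fold over enumerate equals the abstract fold
theorem Afold_eq (N : Nat) (hN : 0 < N) : ∀ (l : List Int) (s : Nat) (bs : List (List Int)),
    bs.length = N →
    (PySem.List.enumerate l ((s : Nat) : Int)).foldl (fun buckets inum =>
      let i := inum.1
      let num := inum.2
      let j : Int :=
        if PySem.Int.mod (PySem.Int.floordiv i (N : Int)) 2 == 0 then PySem.Int.mod i (N : Int)
        else -(PySem.Int.mod i (N : Int)) - 1
      let k : Int := if j < 0 then j + (buckets.length : Int) else j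
      if 0 ≤ k ∧ k < (buckets.length : Int) then
        buckets.set k.toNat (buckets.getD k.toNat [] ++ [num])
      else buckets) bs
    = gfold N bs l s := by
  intro l
  induction l with
  | nil => intro s bs hlen; simp [PySem.List.enumerate_nil, gfold]
  | cons x xs ih =>
    intro s bs hlen
    rw [PySem.List.enumerate_cons, List.foldl_cons]
    have hstep := Astep_eq N hN bs hlen s x
    simp only at hstep ⊢
    rw [hstep]
    have hs1 : ((s : Nat) : Int) + 1 = (((s + 1 : Nat)) : Int) := by push_cast; ring
    rw [hs1, ih (s + 1) _ (by rw [gstep_length]; exact hlen)]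
    rfl

-- chunking: rows of length N
def chunks (N : Nat) : List Int → List (List Int)
  | [] => []
  | x :: xs => (x :: xs.take (N - 1)) :: chunks N (xs.drop (N - 1))
termination_by l => l.length
decreasing_by simp

theorem chunks_cons (N : Nat) (hN : 0 < N) (x : Int) (xs : List Int) :
    chunks N (x :: xs) = (x :: xs).take N :: chunks N ((x :: xs).drop N) := by
  obtain ⟨M, rfl⟩ : ∃ M, N = M + 1 := ⟨N - 1, by omega⟩
  simp only [chunks, Nat.add_sub_cancel, List.take_succ_cons, List.drop_succ_cons]

theorem pvCeilSucc (L N : Nat) (hN : 0 < N) (hL : 1 ≤ L) :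
    (L + N - 1) / N = (L - 1) / N + 1 := by
  have h1 : L + N - 1 = (L - 1) + N := by omega
  rw [h1, Nat.add_div_right _ hN]

theorem pvCeilDrop (L N : Nat) (hN : 0 < N) (hL : 1 ≤ L) :
    ((L - N) + N - 1) / N = (L - 1) / N := by
  by_cases hc : N < L
  · have h2 : L - N + N - 1 = L - 1 - N + N := by omega
    rw [h2, Nat.add_div_right _ hN]
    have h3 : L - 1 = (L - 1 - N) + N := by omega
    conv_rhs => rw [h3, Nat.add_div_right _ hN]
  · have h0 : L - N = 0 := by omega
    rw [h0, Nat.div_eq_of_lt (by omega), Nat.div_eq_of_lt (by omega)]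

theorem chunks_eq_map_range (N : Nat) (hN : 0 < N) :
    ∀ (m : Nat) (l : List Int), l.length ≤ m →
    (List.range ((l.length + N - 1) / N)).map (fun k => (l.drop (k * N)).take N) = chunks N l := by
  intro m
  induction m with
  | zero =>
    intro l hl
    have hnil : l = [] := List.length_eq_zero_iff.mp (by omega)
    subst hnil
    have h0 : (N - 1) / N = 0 := Nat.div_eq_of_lt (by omega)
    simp only [List.length_nil, Nat.zero_add, h0, List.range_zero, List.map_nil, chunks]
  | succ m ih =>
    intro l hl
    match l with
    | [] =>
      have h0 : (N - 1) / N = 0 := Nat.div_eq_of_lt (by omega)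
      simp only [List.length_nil, Nat.zero_add, h0, List.range_zero, List.map_nil, chunks]
    | x :: xs =>
      rw [pvCeilSucc _ _ hN (by simp), List.range_succ_eq_map, List.map_cons, List.map_map]
      rw [chunks_cons N hN]
      congr 1
      · simp
      · have hlen' : ((x :: xs).drop N).length ≤ m := by
          rw [List.length_drop]
          simp only [List.length_cons] at hl ⊢
          omega
        have hR' : (((x :: xs).drop N).length + N - 1) / N = ((x :: xs).length - 1) / N := by
          rw [List.length_drop]
          exact pvCeilDrop _ _ hN (by simp)
        rw [← ih ((x :: xs).drop N) hlen', hR']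
        apply List.map_congr_left
        intro k _
        simp only [Function.comp]
        rw [List.drop_drop]
        have hmul : k.succ * N = k * N + N := Nat.succ_mul k N
        rw [hmul, Nat.add_comm (k * N) N]

-- B's inner step equals the abstract step at global index r*N + p
theorem Bstep_eq (N : Nat) (hN : 0 < N) (r p : Nat) (hp : p < N)
    (bs : List (List Int)) (hlen : bs.length = N) (x : Int) :
    (let j : Int := if PySem.Int.mod ((r : Nat) : Int) 2 == 0 then ((p : Nat) : Int)
        else (N : Int) - 1 - ((p : Nat) : Int);
     bs.set j.toNat (bs.getD j.toNat [] ++ [x]))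
    = gstep N bs (r * N + p) x := by
  have hq : (r * N + p) / N = r := by
    rw [Nat.add_comm, Nat.add_mul_div_right _ _ hN, Nat.div_eq_of_lt hp, Nat.zero_add]
  have hm : (r * N + p) % N = p := by
    rw [Nat.add_comm, Nat.add_mul_mod_self_right, Nat.mod_eq_of_lt hp]
  have h2 : PySem.Int.mod ((r : Nat) : Int) 2 = ((r % 2 : Nat) : Int) := by
    rw [PySem.Int.mod_eq_emod_of_pos (by norm_num : (0:Int) < 2)]
    exact (Int.natCast_mod r 2).symm
  simp only [gstep, hq, hm, h2]
  by_cases h : r % 2 = 0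
  · have hc : (((r % 2 : Nat) : Int) == 0) = true := by rw [beq_iff_eq]; exact_mod_cast h
    simp [h]
  · have hc : (((r % 2 : Nat) : Int) == 0) = false := by
      rw [beq_eq_false_iff_ne]; intro hh; exact h (by exact_mod_cast hh)
    simp only [hc, Bool.false_eq_true, if_false, h]
    have hk : ((N : Int) - 1 - ((p : Nat) : Int)).toNat = N - 1 - p := by omega
    rw [hk]

-- B's inner fold equals the abstract fold
theorem Binner_eq (N : Nat) (hN : 0 < N) (n : Int) (hn : n = (N : Int)) (r : Nat) :
    ∀ (row : List Int) (p0 : Nat) (bs : List (List Int)), bs.length = N → p0 + row.length ≤ N →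
    (PySem.List.enumerate row ((p0 : Nat) : Int)).foldl (fun buckets pnum =>
      let p := pnum.1
      let num := pnum.2
      let j : Int := if PySem.Int.mod ((r : Nat) : Int) 2 == 0 then p else n - 1 - p
      buckets.set j.toNat (buckets.getD j.toNat [] ++ [num])) bs
    = gfold N bs row (r * N + p0) := by
  intro row
  induction row with
  | nil => intro p0 bs hlen hle; simp [PySem.List.enumerate_nil, gfold]
  | cons x xs ih =>
    intro p0 bs hlen hle
    rw [PySem.List.enumerate_cons, List.foldl_cons]
    have hp : p0 < N := by simp only [List.length_cons] at hle; omega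
    have hstep := Bstep_eq N hN r p0 hp bs hlen x
    subst hn
    simp only at hstep ⊢
    rw [hstep]
    have hs1 : ((p0 : Nat) : Int) + 1 = (((p0 + 1 : Nat)) : Int) := by push_cast; ring
    rw [hs1, ih (p0 + 1) _ (by rw [gstep_length]; exact hlen)
      (by simp only [List.length_cons] at hle; omega),
      show r * N + (p0 + 1) = r * N + p0 + 1 from by omega]
    conv_rhs => rw [gfold]

theorem Bouter_eq (N : Nat) (hN : 0 < N) (n : Int) (hn : n = (N : Int)) :
    ∀ (m : Nat) (l : List Int), l.length ≤ m → ∀ (r : Nat) (bs : List (List Int)), bs.length = N →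
    (PySem.List.enumerate (chunks N l) ((r : Nat) : Int)).foldl (fun buckets rrow =>
      (PySem.List.enumerate rrow.2 0).foldl (fun buckets pnum =>
        let p := pnum.1
        let num := pnum.2
        let j : Int := if PySem.Int.mod rrow.1 2 == 0 then p else n - 1 - p
        buckets.set j.toNat (buckets.getD j.toNat [] ++ [num])) buckets) bs
    = gfold N bs l (r * N) := by
  intro m
  induction m with
  | zero =>
    intro l hl r bs hlen
    have hnil : l = [] := List.length_eq_zero_iff.mp (by omega)
    subst hnil
    simp [chunks, PySem.List.enumerate_nil, gfold]
  | succ m ih =>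
    intro l hl r bs hlen
    match l with
    | [] => simp [chunks, PySem.List.enumerate_nil, gfold]
    | x :: xs =>
      rw [chunks_cons N hN, PySem.List.enumerate_cons, List.foldl_cons]
      have htk : ((x :: xs).take N).length ≤ N := by
        rw [List.length_take]; omega
      have hinner := Binner_eq N hN n hn r ((x :: xs).take N) 0 bs hlen
        (by rw [Nat.zero_add]; exact htk)
      simp only [Nat.cast_zero, Nat.add_zero] at hinner
      simp only
      rw [hinner]
      have hlen2 : (gfold N bs ((x :: xs).take N) (r * N)).length = N := by
        rw [gfold_length]; exact hlen
      have hs1 : ((r : Nat) : Int) + 1 = (((r + 1 : Nat)) : Int) := by push_cast; ring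
      have hdroplen : ((x :: xs).drop N).length ≤ m := by
        rw [List.length_drop]
        simp only [List.length_cons] at hl ⊢
        omega
      rw [hs1, ih ((x :: xs).drop N) hdroplen (r + 1) _ hlen2]
      by_cases hc : N ≤ (x :: xs).length
      · have hsplit : (x :: xs) = (x :: xs).take N ++ (x :: xs).drop N :=
          (List.take_append_drop N (x :: xs)).symm
        have hminlen : ((x :: xs).take N).length = N := by rw [List.length_take]; omega
        have hstart : (r + 1) * N = r * N + ((x :: xs).take N).length := by
          rw [hminlen]; ring
        conv_rhs => rw [hsplit, gfold_append, ← hstart]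
      · have hd : (x :: xs).drop N = [] := by
          apply List.drop_eq_nil_of_le
          omega
        have ht : (x :: xs).take N = x :: xs := by
          apply List.take_of_length_le
          omega
        rw [hd, ht]
        simp [gfold]

-- the initial bucket list
theorem init_buckets (n : Int) (N : Nat) (hn : n = (N : Int)) :
    ((PySem.List.pyRange 0 n 1).map (fun _ => ([] : List Int))).length = N := by
  subst hn
  rw [List.length_map, PySem.List.length_pyRange_one]
  omega

-- ===== VERDICT (by name: the statement is the Claim_ definition above) =====
theorem split_bucket_spec : Claim_equal_split_bucket := by
  intro array n hdom hpre
  unfold Spec_split_bucket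
  rcases hpre with hnil | hge
  · subst hnil
    simp only [split_bucket, split_bucket_alt, PySem.List.enumerate_nil, List.foldl_nil]
    by_cases hpos : n > 0
    · rw [if_pos hpos]
      have h0 : PySem.Int.floordiv ((([] : List Int).length : Int) + n - 1) n = 0 := by
        rw [PySem.Int.floordiv_eq_ediv_of_pos hpos]
        simp only [List.length_nil, Nat.cast_zero, Int.zero_add]
        exact Int.ediv_eq_zero_of_lt (by omega) (by omega)
      rw [h0, PySem.List.pyRange_one]
      simp [PySem.List.enumerate_nil]
    · rw [if_neg hpos]
  · obtain ⟨N, hn', hNpos⟩ : ∃ N : Nat, n = (N : Int) ∧ 0 < N :=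
      ⟨n.toNat, by omega, by omega⟩
    subst hn'
    have hinit := init_buckets (N : Int) N rfl
    -- A side
    have hA := Afold_eq N hNpos array 0
      ((PySem.List.pyRange 0 (N : Int) 1).map (fun _ => ([] : List Int))) hinit
    rw [Nat.cast_zero] at hA
    -- B side: the rows are the chunks
    have hrows : (PySem.List.pyRange 0
        (PySem.Int.floordiv ((array.length : Int) + (N : Int) - 1) (N : Int)) 1).map
        (fun k => PySem.List.slice array (some (k * (N : Int))) (some ((k + 1) * (N : Int))))
        = chunks N array := by
      have hcast : (array.length : Int) + (N : Int) - 1 = ((array.length + N - 1 : Nat) : Int) := by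
        push_cast [Nat.cast_sub (by omega : 1 ≤ array.length + N)]
        ring
      rw [hcast, PySem.Int.floordiv_natCast, PySem.List.pyRange_one]
      have htoNat : (((((array.length + N - 1) / N : Nat)) : Int) - 0).toNat
          = (array.length + N - 1) / N := by
        rw [Int.sub_zero, Int.toNat_natCast]
      rw [htoNat, List.map_map]
      rw [← chunks_eq_map_range N hNpos array.length array (le_refl _)]
      apply List.map_congr_left
      intro k _
      simp only [Function.comp]
      have h1 : (0 + (k : Int)) * (N : Int) = ((k * N : Nat) : Int) := by push_cast; ring
      have h2 : (0 + (k : Int) + 1) * (N : Int) = ((k * N : Nat) : Int) + ((N : Nat) : Int) := by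
        push_cast; ring
      rw [h1, h2, PySem.List.slice_natCast_add]
    have hB := Bouter_eq N hNpos (N : Int) rfl array.length array (le_refl _) 0
      ((PySem.List.pyRange 0 (N : Int) 1).map (fun _ => ([] : List Int))) hinit
    rw [Nat.cast_zero, Nat.zero_mul] at hB
    simp only [split_bucket, split_bucket_alt]
    rw [if_pos (by exact_mod_cast hNpos : (0 : Int) < (N : Int))]
    rw [hrows, hA, hB]
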